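-- pv_equiv track=rewrite | github.com/deeppavlov/chatsky | dff/utils/viewer/chord_plot.py | get_ideogram_ends
-- ===== SOURCE A (Python) =====
-- def get_ideogram_ends(ideogram_len, gap):
--     ideo_ends = []
--     left = 0
--     for k in range(len(ideogram_len)):
--         right = left + ideogram_len[k]
--         ideo_ends.append([left, right])
--         left = right + gap
--     return ideo_ends
-- ===== SOURCE B (Python) =====
-- def get_ideogram_ends(ideogram_len, gap):
--     prefix = [0]
--     for length in ideogram_len:
--         prefix.append(prefix[-1] + length)
--     return [[p + k * gap, q + k * gap]
--             for k, (p, q) in enumerate(zip(prefix, prefix[1:]))]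
-- ===== Notes on version B (the rewrite author's own statement) =====
-- stated objective: alternative
-- what changed: Replaces the running left/right accumulator loop by a prefix-sum table built once, then pairs adjacent table entries with zip/enumerate and adds the gap offset k*gap by multiplication instead of repeated addition.
import Mathlib
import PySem

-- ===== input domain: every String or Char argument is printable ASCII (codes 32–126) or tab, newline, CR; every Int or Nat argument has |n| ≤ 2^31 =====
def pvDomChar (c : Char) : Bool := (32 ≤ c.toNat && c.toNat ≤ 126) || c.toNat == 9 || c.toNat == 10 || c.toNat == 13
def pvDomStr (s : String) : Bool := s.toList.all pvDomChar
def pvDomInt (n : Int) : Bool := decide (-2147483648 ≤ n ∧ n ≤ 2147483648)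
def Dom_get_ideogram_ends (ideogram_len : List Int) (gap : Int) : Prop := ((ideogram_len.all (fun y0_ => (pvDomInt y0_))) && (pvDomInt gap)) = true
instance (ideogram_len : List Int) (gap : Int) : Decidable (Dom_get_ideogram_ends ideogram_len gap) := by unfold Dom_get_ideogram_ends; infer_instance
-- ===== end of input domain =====

-- B builds a prefix-sum table once, then pairs adjacent entries via zip/enumerate,
-- adding the gap offset as k*gap; exact on Int, same return value as A (alternative decomposition).

-- ===== PORT A =====
-- literal transliteration of A's loop: for k in range(len(ideogram_len)),
-- state (ideo_ends, left); index k is always in range, so pyGetD is exact.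
def get_ideogram_ends (ideogram_len : List Int) (gap : Int) : List (List Int) :=
  ((PySem.List.pyRange 0 ideogram_len.length 1).foldl
    (fun (st : List (List Int) × Int) k =>
      let right := st.2 + PySem.List.pyGetD ideogram_len k 0
      (st.1 ++ [[st.2, right]], right + gap))
    ([], 0)).1

-- ===== PORT B =====
-- prefix[-1] is PySem.List.pyGetD prefix (-1) 0 (prefix is never empty); prefix[1:] is slice.
def pvPrefixTable (ideogram_len : List Int) : List Int :=
  ideogram_len.foldl (fun c length => c ++ [PySem.List.pyGetD c (-1) 0 + length]) [0]

def get_ideogram_ends_alt (ideogram_len : List Int) (gap : Int) : List (List Int) :=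
  let prefixTable := pvPrefixTable ideogram_len
  (PySem.List.enumerate (prefixTable.zip (PySem.List.slice prefixTable (some 1) none))).map
    (fun kpq => [kpq.2.1 + kpq.1 * gap, kpq.2.2 + kpq.1 * gap])

-- ===== PRECONDITION & SPEC =====
def Spec_get_ideogram_ends (ideogram_len : List Int) (gap : Int) (out : List (List Int)) : Prop := out = get_ideogram_ends_alt ideogram_len gap
instance (ideogram_len : List Int) (gap : Int) (out : List (List Int)) : Decidable (Spec_get_ideogram_ends ideogram_len gap out) := by unfold Spec_get_ideogram_ends; infer_instance

-- ===== CLAIM (what is proved, stated in full; the proofs are below) =====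
def Claim_equal_get_ideogram_ends : Prop := ∀ (ideogram_len : List Int) (gap : Int), Dom_get_ideogram_ends ideogram_len gap → Spec_get_ideogram_ends ideogram_len gap (get_ideogram_ends ideogram_len gap)

-- ===== LEMMAS AND PROOFS =====

-- common reference shape: the interval list and the final `left`
def pvGo (left gap : Int) : List Int → List (List Int)
  | [] => []
  | x :: xs => [left, left + x] :: pvGo (left + x + gap) gap xs

def pvGoL (left gap : Int) : List Int → Int
  | [] => left
  | x :: xs => pvGoL (left + x + gap) gap xs

-- the strict suffix of the prefix table, starting after value `a`
def pvPre (a : Int) : List Int → List Int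
  | [] => []
  | x :: xs => (a + x) :: pvPre (a + x) xs

theorem lemA (gap : Int) (xs : List Int) : ∀ (pre : List Int) (acc : List (List Int)) (left : Int),
    (PySem.List.pyRange (pre.length) (pre.length + xs.length) 1).foldl
      (fun (st : List (List Int) × Int) k =>
        let right := st.2 + PySem.List.pyGetD (pre ++ xs) k 0
        (st.1 ++ [[st.2, right]], right + gap))
      (acc, left)
    = (acc ++ pvGo left gap xs, pvGoL left gap xs) := by
  induction xs with
  | nil => intro pre acc left; simp [pvGo, pvGoL, PySem.List.pyRange]
  | cons x xs ih =>
    intro pre acc left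
    have hlt : (pre.length : Int) < pre.length + (x :: xs).length := by
      simp
    rw [PySem.List.pyRange_one_cons hlt]
    have hx : PySem.List.pyGetD (pre ++ x :: xs) (pre.length) 0 = x := by
      simp [PySem.List.pyGetD_natCast]
    simp only [List.foldl_cons, hx]
    have h1 : (pre.length : Int) + 1 = ((pre ++ [x]).length : Int) := by simp
    have h2 : (pre.length : Int) + ((x :: xs).length : Int) = ((pre ++ [x]).length : Int) + xs.length := by
      simp; omega
    have h3 : pre ++ x :: xs = (pre ++ [x]) ++ xs := by simp
    rw [h1, h2, h3, ih (pre ++ [x]) (acc ++ [[left, left + x]]) (left + x + gap)]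
    simp [pvGo, pvGoL]

theorem lemPrefix (xs : List Int) : ∀ (c : List Int) (a : Int),
    xs.foldl (fun c length => c ++ [PySem.List.pyGetD c (-1) 0 + length]) (c ++ [a])
    = (c ++ [a]) ++ pvPre a xs := by
  induction xs with
  | nil => intro c a; simp [pvPre]
  | cons x xs ih =>
    intro c a
    simp only [List.foldl_cons, PySem.List.pyGetD_neg_one_append_singleton]
    rw [List.append_assoc c [a] [a + x]]
    rw [show c ++ ([a] ++ [a + x]) = (c ++ [a]) ++ [a + x] by simp]
    rw [ih (c ++ [a]) (a + x)]
    simp [pvPre]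

theorem lemB2 (gap : Int) (xs : List Int) : ∀ (left s : Int),
    (PySem.List.enumerate ((left :: pvPre left xs).zip (pvPre left xs)) s).map
      (fun kpq => [kpq.2.1 + kpq.1 * gap, kpq.2.2 + kpq.1 * gap])
    = pvGo (left + s * gap) gap xs := by
  induction xs with
  | nil => intro left s; simp [pvPre, pvGo]
  | cons x xs ih =>
    intro left s
    simp only [pvPre, List.zip_cons_cons, PySem.List.enumerate_cons, List.map_cons]
    rw [ih (left + x) (s + 1)]
    simp only [pvGo]
    have e1 : left + x + s * gap = left + s * gap + x := by ring
    have e2 : left + x + (s + 1) * gap = left + s * gap + x + gap := by ring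
    rw [e1, e2]

theorem get_ideogram_ends_eq (l : List Int) (gap : Int) :
    get_ideogram_ends l gap = pvGo 0 gap l := by
  have := lemA gap l [] [] 0
  simp only [List.length_nil, Nat.cast_zero, List.nil_append, zero_add] at this
  simp [get_ideogram_ends, this]

theorem get_ideogram_ends_alt_eq (l : List Int) (gap : Int) :
    get_ideogram_ends_alt l gap = pvGo 0 gap l := by
  have hp : pvPrefixTable l = 0 :: pvPre 0 l := by
    have := lemPrefix l [] 0
    simpa [pvPrefixTable] using this
  have h := lemB2 gap l 0 0
  simp only [zero_add, zero_mul] at h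
  simp [get_ideogram_ends_alt, hp, PySem.List.slice_from_one, h]

-- ===== VERDICT (by name: the statement is the Claim_ definition above) =====
theorem get_ideogram_ends_spec : Claim_equal_get_ideogram_ends := by
  intro l gap _
  unfold Spec_get_ideogram_ends
  rw [get_ideogram_ends_eq, get_ideogram_ends_alt_eq]
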